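-- pv_equiv track=rewrite | github.com/girishsontakke/python_code | HackerRank/bitwise_operator.py | max_bitwise
-- ===== SOURCE A (Python) =====
-- def max_bitwise(n, k):
--     bitwise = 0
--     for i in range(1, n+1):
--         for j in range(i+1, n + 1):
--             if bitwise < (i&j) < k:
--                 bitwise = (i&j)
--                 if bitwise == k - 1:
--                     return bitwise
--
--     return bitwise
-- ===== SOURCE B (Python) =====
-- def max_bitwise(n, k):
--     # Scan candidate values downward: v is achievable as i&j (1<=i<j<=n)
--     # iff v | (v+1) <= n; return the largest achievable v below k, else 0.
--     v = min(k - 1, n - 1)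
--     while v >= 1:
--         if (v | (v + 1)) <= n:
--             return v
--         v -= 1
--     return 0
-- ===== Notes on version B (the rewrite author's own statement) =====
-- stated objective: faster
-- what changed: Replaces A's O(n^2) double loop over all pairs (i,j) by a downward scan over candidate values v = min(k-1,n-1)..1, returning the first v with (v | (v+1)) <= n, which characterises exactly the values achievable as i&j with 1 <= i < j <= n.
import Mathlib
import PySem

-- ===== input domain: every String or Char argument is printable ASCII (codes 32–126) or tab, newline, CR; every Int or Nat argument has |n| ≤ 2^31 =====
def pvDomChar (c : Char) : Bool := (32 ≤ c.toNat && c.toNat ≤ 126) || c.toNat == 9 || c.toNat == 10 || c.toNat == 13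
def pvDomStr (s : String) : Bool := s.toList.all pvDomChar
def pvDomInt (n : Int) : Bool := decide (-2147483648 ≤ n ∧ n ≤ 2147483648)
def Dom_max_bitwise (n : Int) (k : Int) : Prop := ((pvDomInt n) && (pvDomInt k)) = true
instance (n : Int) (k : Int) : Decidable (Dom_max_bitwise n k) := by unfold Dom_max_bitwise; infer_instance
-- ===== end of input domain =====

-- B replaces A's O(n^2) scan of all pairs by a downward scan over candidate
-- values v < k, using that v is achievable as i&j (1 <= i < j <= n) iff
-- v | (v+1) <= n; measurably faster (objective: faster).


-- ===== PORT A =====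
-- inner `for j` loop; `Sum.inl r` = the function returned r, `Sum.inr b` = loop
-- finished with `bitwise = b`
def aInner (k i : Int) (b : Int) : List Int → Int ⊕ Int
  | [] => Sum.inr b
  | j :: js =>
    if b < PySem.Int.band i j ∧ PySem.Int.band i j < k then
      if PySem.Int.band i j = k - 1 then Sum.inl (PySem.Int.band i j)
      else aInner k i (PySem.Int.band i j) js
    else aInner k i b js

-- outer `for i` loop
def aOuter (n k : Int) (b : Int) : List Int → Int
  | [] => b
  | i :: is =>
    match aInner k i b (PySem.List.pyRange (i+1) (n+1) 1) with
    | Sum.inl r => r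
    | Sum.inr b' => aOuter n k b' is

def max_bitwise (n : Int) (k : Int) : Int :=
  aOuter n k 0 (PySem.List.pyRange 1 (n+1) 1)

-- ===== PORT B =====
-- the `while v >= 1` loop of Source B
def bLoop (n : Int) (v : Int) : Int :=
  if 1 ≤ v then
    if PySem.Int.bor v (v+1) ≤ n then v else bLoop n (v-1)
  else 0
termination_by v.toNat
decreasing_by omega

def max_bitwise_alt (n : Int) (k : Int) : Int :=
  bLoop n (min (k-1) (n-1))

-- ===== PRECONDITION & SPEC =====
def Spec_max_bitwise (n : Int) (k : Int) (out : Int) : Prop := out = max_bitwise_alt n k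
instance (n : Int) (k : Int) (out : Int) : Decidable (Spec_max_bitwise n k out) := by unfold Spec_max_bitwise; infer_instance

-- ===== CLAIM (what is proved, stated in full; the proofs are below) =====
def Claim_equal_max_bitwise : Prop := ∀ (n : Int) (k : Int), Dom_max_bitwise n k → Spec_max_bitwise n k (max_bitwise n k)

-- ===== LEMMAS AND PROOFS =====

-- ---- pure Nat bit lemmas ----
theorem and_mod_two (a b : Nat) : (a &&& b) % 2 = a % 2 * (b % 2) := by
  have h : (a &&& b).testBit 0 = (a.testBit 0 && b.testBit 0) := Nat.testBit_and ..
  rw [Nat.testBit_zero, Nat.testBit_zero, Nat.testBit_zero, ← Bool.decide_and] at h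
  have h' := decide_eq_decide.mp h
  rcases Nat.mod_two_eq_zero_or_one a with h1|h1 <;>
    rcases Nat.mod_two_eq_zero_or_one b with h2|h2 <;> rw [h1, h2] <;> omega

theorem or_mod_two_left (a b : Nat) (h1 : a % 2 = 1) : (a ||| b) % 2 = 1 := by
  have h : (a ||| b).testBit 0 = (a.testBit 0 || b.testBit 0) := Nat.testBit_or ..
  rw [Nat.testBit_zero, Nat.testBit_zero, Nat.testBit_zero, ← Bool.decide_or] at h
  have h' := decide_eq_decide.mp h
  omega

theorem or_succ_of_even (v : Nat) (hv : v % 2 = 0) : v ||| (v+1) = v + 1 := by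
  apply Nat.eq_of_testBit_eq; intro i
  cases i with
  | zero =>
    rw [Nat.testBit_or, Nat.testBit_zero, Nat.testBit_zero]
    have h1 : ¬ (v % 2 = 1) := by omega
    have h2 : (v+1) % 2 = 1 := by omega
    simp [h1, h2]
  | succ i =>
    simp only [Nat.testBit_add_one, Nat.or_div_two]
    have : (v+1)/2 = v/2 := by omega
    rw [this, Nat.or_self]

-- v | (v+1) is the least strict superset of v's bit set
theorem minSup : ∀ v j : Nat, v &&& j = v → v < j → v ||| (v+1) ≤ j := by
  intro v
  induction v using Nat.strong_induction_on with
  | _ v ih =>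
    intro j hand hlt
    rcases Nat.mod_two_eq_zero_or_one v with hv|hv
    · rw [or_succ_of_even v hv]; omega
    · have hj : j % 2 = 1 := by
        have h := and_mod_two v j; rw [hand] at h
        rcases Nat.mod_two_eq_zero_or_one j with h2|h2
        · rw [h2] at h; omega
        · exact h2
      have hdiv : v/2 &&& j/2 = v/2 := by
        have h := Nat.and_div_two (a := v) (b := j); rw [hand] at h; omega
      have hih := ih (v/2) (by omega) (j/2) hdiv (by omega)
      have hor2 : (v ||| (v+1)) / 2 = v/2 ||| (v/2 + 1) := by
        rw [Nat.or_div_two]; congr 1; omega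
      have hm : (v ||| (v+1)) % 2 = 1 := or_mod_two_left _ _ hv
      omega

theorem absorb (v : Nat) : v &&& (v ||| (v+1)) = v := by
  apply Nat.eq_of_testBit_eq; intro i
  simp [Nat.testBit_and, Nat.testBit_or]
  intro h; simp [h]

-- ---- value characterisation on Int ----
-- Ach n v: v arises as i & j for some pair 1 ≤ i < j ≤ n
def Ach (n v : Int) : Prop := ∃ i j : Int, 1 ≤ i ∧ i < j ∧ j ≤ n ∧ PySem.Int.band i j = v
-- G n v: B's feasibility test
def G (n v : Int) : Prop := 1 ≤ v ∧ PySem.Int.bor v (v+1) ≤ n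

theorem ach_iff_G (n v : Int) (hv : 1 ≤ v) : Ach n v ↔ G n v := by
  have hv0 : (0:Int) ≤ v := by omega
  have hb : PySem.Int.bor v (v+1) = ((v.toNat ||| (v.toNat + 1) : Nat) : Int) := by
    rw [PySem.Int.bor_of_nonneg hv0 (by omega)]
    congr 2; omega
  constructor
  · rintro ⟨i, j, hi, hij, hjn, hband⟩
    have hi0 : (0:Int) ≤ i := by omega
    have hj0 : (0:Int) ≤ j := by omega
    have hbn : PySem.Int.band i j = ((i.toNat &&& j.toNat : Nat) : Int) :=
      PySem.Int.band_of_nonneg hi0 hj0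
    rw [hbn] at hband
    set I := i.toNat; set J := j.toNat
    have hVJ : v.toNat = I &&& J := by omega
    have hsub : v.toNat &&& J = v.toNat := by
      rw [hVJ, Nat.and_assoc, Nat.and_self]
    have hle : v.toNat < J := by
      have h1 : (I &&& J : Nat) ≤ I := Nat.and_le_left
      omega
    have := minSup v.toNat J hsub hle
    refine ⟨hv, ?_⟩
    rw [hb]; omega
  · rintro ⟨_, hle⟩
    refine ⟨v, PySem.Int.bor v (v+1), hv, ?_, hle, ?_⟩
    · rw [hb]
      have := Nat.right_le_or (n := v.toNat) (m := v.toNat + 1)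
      omega
    · rw [hb, PySem.Int.band_of_nonneg hv0 (by positivity)]
      have ht : ((v.toNat ||| (v.toNat + 1) : Nat) : Int).toNat = v.toNat ||| (v.toNat + 1) := by
        omega
      rw [ht, absorb]; omega

-- ---- B's loop: returns the greatest G-value ≤ v0, else 0 ----
theorem bLoop_spec_aux (n : Int) : ∀ (m : Nat) (v0 : Int), v0.toNat ≤ m →
    (bLoop n v0 = 0 ∧ ∀ w, G n w → ¬ w ≤ v0) ∨
    (G n (bLoop n v0) ∧ bLoop n v0 ≤ v0 ∧ ∀ w, G n w → w ≤ v0 → w ≤ bLoop n v0) := by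
  intro m
  induction m with
  | zero =>
    intro v0 hm
    left
    rw [bLoop, if_neg (by omega)]
    exact ⟨rfl, fun w hw hle => by rcases hw with ⟨h1, _⟩; omega⟩
  | succ m ihm =>
    intro v0 hm
    by_cases h1 : 1 ≤ v0
    · rw [bLoop, if_pos h1]
      by_cases h2 : PySem.Int.bor v0 (v0+1) ≤ n
      · rw [if_pos h2]
        right
        exact ⟨⟨h1, h2⟩, le_refl _, fun w _ hle => hle⟩
      · rw [if_neg h2]
        rcases ihm (v0 - 1) (by omega) with ⟨hz, hnone⟩ | ⟨hg, hle, hmax⟩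
        · left
          refine ⟨hz, fun w hw hle => ?_⟩
          by_cases hw0 : w = v0
          · subst hw0; exact h2 hw.2
          · exact hnone w hw (by omega)
        · right
          refine ⟨hg, by omega, fun w hw hle => ?_⟩
          by_cases hw0 : w = v0
          · subst hw0; exact absurd hw.2 h2
          · exact hmax w hw (by omega)
    · rw [bLoop, if_neg h1]
      left
      exact ⟨rfl, fun w hw hle => by rcases hw with ⟨hw1, _⟩; omega⟩

theorem bLoop_spec (n v0 : Int) :
    (bLoop n v0 = 0 ∧ ∀ w, G n w → ¬ w ≤ v0) ∨
    (G n (bLoop n v0) ∧ bLoop n v0 ≤ v0 ∧ ∀ w, G n w → w ≤ v0 → w ≤ bLoop n v0) :=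
  bLoop_spec_aux n v0.toNat v0 (le_refl _)

-- ---- A's loops ----
theorem aInner_spec (k i : Int) : ∀ (js : List Int) (b : Int),
    (∀ r, aInner k i b js = Sum.inl r →
       r = k - 1 ∧ b < r ∧ ∃ j ∈ js, PySem.Int.band i j = r) ∧
    (∀ b', aInner k i b js = Sum.inr b' →
       b ≤ b' ∧ (b' = b ∨ (b' < k ∧ b < b' ∧ ∃ j ∈ js, PySem.Int.band i j = b')) ∧
       ∀ j ∈ js, PySem.Int.band i j < k → PySem.Int.band i j ≤ b') := by
  intro js
  induction js with
  | nil =>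
    intro b
    refine ⟨fun r hr => by simp [aInner] at hr, fun b' hb' => ?_⟩
    simp [aInner] at hb'
    subst hb'
    exact ⟨le_refl _, Or.inl rfl, by simp⟩
  | cons j js ihj =>
    intro b
    constructor
    · intro r hr
      rw [aInner] at hr
      split_ifs at hr with hcond heq
      · injection hr with hr; subst hr
        exact ⟨heq, hcond.1, j, by simp, rfl⟩
      · rcases (ihj (PySem.Int.band i j)).1 r hr with ⟨h1, h2, jw, hjw, hband⟩
        exact ⟨h1, by omega, jw, by simp [hjw], hband⟩
      · rcases (ihj b).1 r hr with ⟨h1, h2, jw, hjw, hband⟩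
        exact ⟨h1, h2, jw, by simp [hjw], hband⟩
    · intro b' hb'
      rw [aInner] at hb'
      split_ifs at hb' with hcond heq
      · rcases (ihj (PySem.Int.band i j)).2 b' hb' with ⟨h1, h2, h3⟩
        refine ⟨by omega, ?_, ?_⟩
        · rcases h2 with h2 | ⟨ha, hb2, jw, hjw, hband⟩
          · exact Or.inr ⟨by omega, by omega, j, by simp, by omega⟩
          · exact Or.inr ⟨ha, by omega, jw, by simp [hjw], hband⟩
        · intro jw hjw hk
          rcases List.mem_cons.mp hjw with h | h
          · subst h; exact h1
          · exact h3 jw h hk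
      · rcases (ihj b).2 b' hb' with ⟨h1, h2, h3⟩
        refine ⟨h1, ?_, ?_⟩
        · rcases h2 with h2 | ⟨ha, hb2, jw, hjw, hband⟩
          · exact Or.inl h2
          · exact Or.inr ⟨ha, hb2, jw, by simp [hjw], hband⟩
        · intro jw hjw hk
          rcases List.mem_cons.mp hjw with h | h
          · subst h
            -- the branch was not taken: band ≤ b or band ≥ k
            have : ¬ (b < PySem.Int.band i jw ∧ PySem.Int.band i jw < k) := hcond
            omega
          · exact h3 jw h hk

theorem aOuter_spec (n k : Int) : ∀ (is : List Int) (b : Int),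
    b ≤ aOuter n k b is ∧
    (aOuter n k b is = b ∨
      (aOuter n k b is < k ∧ b < aOuter n k b is ∧
        ∃ i ∈ is, ∃ j ∈ PySem.List.pyRange (i+1) (n+1) 1,
          PySem.Int.band i j = aOuter n k b is)) ∧
    ∀ i ∈ is, ∀ j ∈ PySem.List.pyRange (i+1) (n+1) 1,
      PySem.Int.band i j < k → PySem.Int.band i j ≤ aOuter n k b is := by
  intro is
  induction is with
  | nil =>
    intro b
    refine ⟨le_refl _, Or.inl rfl, by simp⟩
  | cons i is ihi =>
    intro b
    rcases hres : aInner k i b (PySem.List.pyRange (i+1) (n+1) 1) with r | b' <;>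
      simp only [aOuter, hres]
    · -- early return
      rcases (aInner_spec k i (PySem.List.pyRange (i+1) (n+1) 1) b).1 r hres with
        ⟨hk1, hbr, jw, hjw, hband⟩
      refine ⟨by omega, Or.inr ⟨by omega, hbr, i, by simp, jw, hjw, hband⟩, ?_⟩
      intro i' hi' j hj hk
      omega
    · rcases (aInner_spec k i (PySem.List.pyRange (i+1) (n+1) 1) b).2 b' hres with
        ⟨hbb', hdisj, hub⟩
      rcases ihi b' with ⟨hmono, hdisj2, hub2⟩
      refine ⟨by omega, ?_, ?_⟩
      · rcases hdisj2 with h | ⟨h1, h2, iw, hiw, jw, hjw, hband⟩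
        · rw [h]
          rcases hdisj with h' | ⟨h1, h2, jw, hjw, hband⟩
          · exact Or.inl h'
          · exact Or.inr ⟨h1, h2, i, by simp, jw, hjw, hband⟩
        · exact Or.inr ⟨h1, by omega, iw, by simp [hiw], jw, hjw, hband⟩
      · intro i' hi' j hj hk
        rcases List.mem_cons.mp hi' with h | h
        · subst h
          have := hub j hj hk
          omega
        · exact hub2 i' h j hj hk

theorem main_eq (n k : Int) : max_bitwise n k = max_bitwise_alt n k := by
  rw [max_bitwise, max_bitwise_alt]
  rcases aOuter_spec n k (PySem.List.pyRange 1 (n+1) 1) 0 with ⟨hr0, hdisj, hub⟩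
  generalize hrdef : aOuter n k 0 (PySem.List.pyRange 1 (n+1) 1) = r at *
  -- upper bound, phrased via Ach
  have hubA : ∀ w, Ach n w → w < k → w ≤ r := by
    rintro w ⟨i, j, hi, hij, hjn, hband⟩ hwk
    have hmi : i ∈ PySem.List.pyRange 1 (n+1) 1 := by
      rw [PySem.List.mem_pyRange_one]; omega
    have hmj : j ∈ PySem.List.pyRange (i+1) (n+1) 1 := by
      rw [PySem.List.mem_pyRange_one]; omega
    have := hub i hmi j hmj (by omega)
    omega
  rcases hdisj with hz | ⟨hrk, hrpos, iw, hiw, jw, hjw, hband⟩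
  · -- A returned 0: no achievable value in (0, k) exists
    rw [hz]
    rcases bLoop_spec n (min (k-1) (n-1)) with ⟨h0, _⟩ | ⟨hg, hle, _⟩
    · omega
    · -- impossible: the found value would be achievable and ≤ 0
      exfalso
      have hs1 : 1 ≤ bLoop n (min (k-1) (n-1)) := hg.1
      have hach : Ach n (bLoop n (min (k-1) (n-1))) := (ach_iff_G n _ hs1).mpr hg
      have := hubA _ hach (by omega)
      omega
  · -- A returned an achieved value r with 0 < r < k
    have hachr : Ach n r := by
      rw [PySem.List.mem_pyRange_one] at hiw hjw
      exact ⟨iw, jw, by omega, by omega, by omega, hband⟩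
    have hGr : G n r := (ach_iff_G n r (by omega)).mp hachr
    have hrn : r ≤ n - 1 := by
      rcases hGr with ⟨h1, h2⟩
      have h0 : (0:Int) ≤ r := by omega
      have hb : PySem.Int.bor r (r+1) = ((r.toNat ||| (r.toNat + 1) : Nat) : Int) := by
        rw [PySem.Int.bor_of_nonneg h0 (by omega)]; congr 2; omega
      have := Nat.right_le_or (n := r.toNat) (m := r.toNat + 1)
      rw [hb] at h2
      omega
    have hrmin : r ≤ min (k-1) (n-1) := by omega
    rcases bLoop_spec n (min (k-1) (n-1)) with ⟨h0, hnone⟩ | ⟨hg, hle, hmax⟩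
    · exact absurd hrmin (hnone r hGr)
    · have h1 : r ≤ bLoop n (min (k-1) (n-1)) := hmax r hGr hrmin
      have h2 : bLoop n (min (k-1) (n-1)) ≤ r := by
        have hs1 : 1 ≤ bLoop n (min (k-1) (n-1)) := hg.1
        have hach : Ach n (bLoop n (min (k-1) (n-1))) := (ach_iff_G n _ hs1).mpr hg
        exact hubA _ hach (by omega)
      omega


-- ===== VERDICT (by name: the statement is the Claim_ definition above) =====
theorem max_bitwise_spec : Claim_equal_max_bitwise := by
  intro n k _
  unfold Spec_max_bitwise
  exact main_eq n k
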